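-- pv_equiv track=rewrite | github.com/sjogleka/General_codes | removeOnedigit.py | removeOneDigit
-- ===== SOURCE A (Python) =====
-- def removeOneDigit(s,t):
--     sList = list(s)
--     tList = list(t)
--     count = 0
--     for i in range(len(tList)):
--         tl = tList.copy()
--         if tList[i].isdigit():
--             tl.pop(i)
--             if s < ''.join(tl):
--                 count+=1
--     for i in range(len(sList)):
--         sl = sList.copy()
--         if sList[i].isdigit():
--             sl.pop(i)
--             if ''.join(sl) < t:
--                 count+=1
--     return count
-- ===== SOURCE B (Python) =====
-- def removeOneDigit(s, t):
--     return _cntT(s, t) + _cntS(s, t)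
--
--
-- def _digits(u, k):
--     # number of digit characters in u[k:]
--     n = 0
--     for ch in u[k:]:
--         if ch.isdigit():
--             n += 1
--     return n
--
--
-- def _cntT(s, t):
--     # digits of t whose deletion makes s < t'
--     count = 0
--     j = 0
--     while j < len(t):
--         c = t[j]
--         if c.isdigit() and s[j:] < t[j + 1:]:
--             count += 1
--         if j >= len(s):
--             count += _digits(t, j + 1)
--             break
--         a = s[j]
--         if a < c:
--             count += _digits(t, j + 1)
--             break
--         if a > c:
--             break
--         j += 1
--     return count
--
--
-- def _cntS(s, t):
--     # digits of s whose deletion makes s' < t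
--     count = 0
--     j = 0
--     while j < len(s):
--         a = s[j]
--         if a.isdigit() and s[j + 1:] < t[j:]:
--             count += 1
--         if j >= len(t):
--             break
--         c = t[j]
--         if a < c:
--             count += _digits(s, j + 1)
--             break
--         if a > c:
--             break
--         j += 1
--     return count
-- ===== Notes on version B (the rewrite author's own statement) =====
-- stated objective: faster
-- what changed: Instead of materialising the deleted string for every digit position (copy, pop, join, full lexicographic compare), B walks the common prefix of s and t once: at each position it decides the one deletion starting there with a suffix compare, and as soon as the strings diverge or one ends it resolves all remaining digit positions at once by a digit count, never building any string.
import Mathlib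
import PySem

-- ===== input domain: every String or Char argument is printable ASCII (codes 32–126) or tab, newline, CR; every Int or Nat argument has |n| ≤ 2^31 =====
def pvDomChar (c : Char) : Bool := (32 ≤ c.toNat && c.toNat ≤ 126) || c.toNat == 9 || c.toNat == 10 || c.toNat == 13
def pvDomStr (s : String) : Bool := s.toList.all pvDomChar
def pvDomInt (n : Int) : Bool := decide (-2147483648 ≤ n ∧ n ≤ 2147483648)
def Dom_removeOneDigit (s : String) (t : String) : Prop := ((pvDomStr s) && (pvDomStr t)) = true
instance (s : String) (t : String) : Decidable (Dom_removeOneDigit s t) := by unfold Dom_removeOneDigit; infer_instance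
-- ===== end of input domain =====

-- B walks the common prefix of s and t once, deciding each in-prefix deletion by a suffix
-- compare and all deletions past the first mismatch by a single digit count; no deleted
-- string is ever materialised (objective: faster by early termination at the first mismatch).

-- ===== PORT A =====
-- Python's `x < y` on str is Lean's `<` on `List Char` (PySem doc); `''.join(tl)` of a list of
-- single chars is that char list, so `s < ''.join(tl)` is ported as `sList < tl`.
def removeOneDigit (s : String) (t : String) : Int :=
  let sList := s.toList
  let tList := t.toList
  let count : Int := 0
  -- for i in range(len(tList)): tl = tList.copy(); if tList[i].isdigit(): tl.pop(i); if s < ''.join(tl): count += 1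
  let count := (PySem.List.pyRange 0 (tList.length : Int) 1).foldl (fun count i =>
    if PySem.Chars.isdigit (PySem.List.pyGetD tList i ' ') then
      match PySem.List.pop? tList i with
      | some (_, tl) => if sList < tl then count + 1 else count
      | none => count
    else count) count
  -- for i in range(len(sList)): sl = sList.copy(); if sList[i].isdigit(): sl.pop(i); if ''.join(sl) < t: count += 1
  let count := (PySem.List.pyRange 0 (sList.length : Int) 1).foldl (fun count i =>
    if PySem.Chars.isdigit (PySem.List.pyGetD sList i ' ') then
      match PySem.List.pop? sList i with
      | some (_, sl) => if sl < tList then count + 1 else count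
      | none => count
    else count) count
  count

-- ===== PORT B =====
-- _digits(u, k): the Lean recursion receives the suffix u[k:] directly
def digitsFrom (u : List Char) : Int :=
  u.foldl (fun n ch => if PySem.Chars.isdigit ch then n + 1 else n) 0

-- _cntT's while loop, as recursion on the two suffixes s[j:], t[j:]
def cntT : List Char → List Char → Int
  | _, [] => 0
  | s, c :: r =>
    (if PySem.Chars.isdigit c ∧ s < r then (1 : Int) else 0) +
    (match s with
     | [] => digitsFrom r
     | a :: s' =>
       if a < c then digitsFrom r
       else if a = c then cntT s' r
       else 0)

-- _cntS's while loop, as recursion on the two suffixes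
def cntS : List Char → List Char → Int
  | [], _ => 0
  | a :: s', t =>
    (if PySem.Chars.isdigit a ∧ s' < t then (1 : Int) else 0) +
    (match t with
     | [] => 0
     | c :: r =>
       if a < c then digitsFrom s'
       else if a = c then cntS s' r
       else 0)

def removeOneDigit_alt (s : String) (t : String) : Int :=
  cntT s.toList t.toList + cntS s.toList t.toList

-- ===== PRECONDITION & SPEC =====
def Spec_removeOneDigit (s : String) (t : String) (out : Int) : Prop := out = removeOneDigit_alt s t
instance (s : String) (t : String) (out : Int) : Decidable (Spec_removeOneDigit s t out) := by unfold Spec_removeOneDigit; infer_instance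

-- ===== CLAIM (what is proved, stated in full; the proofs are below) =====
def Claim_equal_removeOneDigit : Prop := ∀ (s : String) (t : String), Dom_removeOneDigit s t → Spec_removeOneDigit s t (removeOneDigit s t)

-- ===== LEMMAS AND PROOFS =====

-- A's per-index contribution for the t-loop / the s-loop
def aTermT (s t : List Char) (i : Nat) : Int :=
  if PySem.Chars.isdigit (t.getD i ' ') = true ∧ s < t.eraseIdx i then 1 else 0
def aTermS (s t : List Char) (i : Nat) : Int :=
  if PySem.Chars.isdigit (s.getD i ' ') = true ∧ s.eraseIdx i < t then 1 else 0

theorem digitsFrom_eq_countP (u : List Char) :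
    digitsFrom u = (u.countP PySem.Chars.isdigit : Int) := by
  unfold digitsFrom
  simpa using PySem.List.foldl_count_if PySem.Chars.isdigit u 0

theorem digitsSum (r : List Char) :
    (∑ i ∈ Finset.range r.length,
        (if PySem.Chars.isdigit (r.getD i ' ') = true then (1 : Int) else 0)) = digitsFrom r := by
  induction r with
  | nil => simp [digitsFrom]
  | cons c r ih =>
    rw [List.length_cons, Finset.sum_range_succ']
    simp only [List.getD_cons_succ, List.getD_cons_zero]
    rw [ih, digitsFrom_eq_countP, digitsFrom_eq_countP, List.countP_cons]
    by_cases h : PySem.Chars.isdigit c = true <;> simp [h]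

theorem sumT_eq_cntT : ∀ (t s : List Char),
    (∑ i ∈ Finset.range t.length, aTermT s t i) = cntT s t := by
  intro t
  induction t with
  | nil => intro s; simp [cntT, aTermT]
  | cons c r ih =>
    intro s
    rw [List.length_cons, Finset.sum_range_succ']
    have h0 : aTermT s (c :: r) 0 =
        if PySem.Chars.isdigit c = true ∧ s < r then (1 : Int) else 0 := by
      simp [aTermT]
    have hsucc : ∀ i, aTermT s (c :: r) (i + 1) =
        if PySem.Chars.isdigit (r.getD i ' ') = true ∧ s < c :: r.eraseIdx i then (1 : Int)
        else 0 := by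
      intro i
      simp [aTermT, List.eraseIdx_cons_succ]
    simp only [hsucc, h0]
    cases s with
    | nil =>
      have heq : (fun i => if PySem.Chars.isdigit (r.getD i ' ') = true ∧
            ([] : List Char) < c :: r.eraseIdx i then (1 : Int) else 0) =
          (fun i => if PySem.Chars.isdigit (r.getD i ' ') = true then (1 : Int) else 0) :=
        funext fun i => by simp [List.nil_lt_cons]
      rw [heq, digitsSum]
      simp [cntT, add_comm]
    | cons a s' =>
      by_cases hac : a < c
      · have heq : (fun i => if PySem.Chars.isdigit (r.getD i ' ') = true ∧
              (a :: s') < c :: r.eraseIdx i then (1 : Int) else 0) =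
            (fun i => if PySem.Chars.isdigit (r.getD i ' ') = true then (1 : Int) else 0) :=
          funext fun i => by simp [List.cons_lt_cons_iff, hac]
        rw [heq, digitsSum]
        simp [cntT, hac, add_comm]
      · by_cases hec : a = c
        · subst hec
          have heq : (fun i => if PySem.Chars.isdigit (r.getD i ' ') = true ∧
                (a :: s') < a :: r.eraseIdx i then (1 : Int) else 0) =
              (fun i => aTermT s' r i) :=
            funext fun i => by simp [aTermT]
          rw [heq, ih s']
          simp [cntT, add_comm]
        · have heq : (fun i => if PySem.Chars.isdigit (r.getD i ' ') = true ∧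
                (a :: s') < c :: r.eraseIdx i then (1 : Int) else 0) =
              (fun _ => (0 : Int)) :=
            funext fun i => by simp [List.cons_lt_cons_iff, hac, hec]
          rw [heq]
          simp [cntT, hac, hec]

theorem sumS_eq_cntS : ∀ (s t : List Char),
    (∑ i ∈ Finset.range s.length, aTermS s t i) = cntS s t := by
  intro s
  induction s with
  | nil => intro t; simp [cntS, aTermS]
  | cons a s' ih =>
    intro t
    rw [List.length_cons, Finset.sum_range_succ']
    have h0 : aTermS (a :: s') t 0 =
        if PySem.Chars.isdigit a = true ∧ s' < t then (1 : Int) else 0 := by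
      simp [aTermS]
    have hsucc : ∀ i, aTermS (a :: s') t (i + 1) =
        if PySem.Chars.isdigit (s'.getD i ' ') = true ∧ (a :: s'.eraseIdx i) < t then (1 : Int)
        else 0 := by
      intro i
      simp [aTermS, List.eraseIdx_cons_succ]
    simp only [hsucc, h0]
    cases t with
    | nil =>
      have heq : (fun i => if PySem.Chars.isdigit (s'.getD i ' ') = true ∧
            (a :: s'.eraseIdx i) < ([] : List Char) then (1 : Int) else 0) =
          (fun _ => (0 : Int)) :=
        funext fun i => by simp [List.not_lt_nil]
      rw [heq]
      simp [cntS, List.not_lt_nil]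
    | cons c r =>
      by_cases hac : a < c
      · have heq : (fun i => if PySem.Chars.isdigit (s'.getD i ' ') = true ∧
              (a :: s'.eraseIdx i) < c :: r then (1 : Int) else 0) =
            (fun i => if PySem.Chars.isdigit (s'.getD i ' ') = true then (1 : Int) else 0) :=
          funext fun i => by simp [List.cons_lt_cons_iff, hac]
        rw [heq, digitsSum]
        simp [cntS, hac, add_comm]
      · by_cases hec : a = c
        · subst hec
          have heq : (fun i => if PySem.Chars.isdigit (s'.getD i ' ') = true ∧
                (a :: s'.eraseIdx i) < a :: r then (1 : Int) else 0) =
              (fun i => aTermS s' r i) :=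
            funext fun i => by simp [aTermS]
          rw [heq, ih r]
          simp [cntS, add_comm]
        · have heq : (fun i => if PySem.Chars.isdigit (s'.getD i ' ') = true ∧
                (a :: s'.eraseIdx i) < c :: r then (1 : Int) else 0) =
              (fun _ => (0 : Int)) :=
            funext fun i => by simp [List.cons_lt_cons_iff, hac, hec]
          rw [heq]
          simp [cntS, hac, hec]

theorem foldl_range_add (n : Nat) (f : Nat → Int) (x : Int) :
    (List.range n).foldl (fun a i => a + f i) x = x + ∑ i ∈ Finset.range n, f i := by
  rw [PySem.List.foldl_add]
  rfl

theorem bodyT_eq (s t : List Char) (count : Int) (i : Nat) (h : i < t.length) :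
    (if PySem.Chars.isdigit (PySem.List.pyGetD t (↑i) ' ') then
        match PySem.List.pop? t (↑i) with
        | some (_, tl) => if s < tl then count + 1 else count
        | none => count
      else count) = count + aTermT s t i := by
  rw [PySem.List.pyGetD_natCast, PySem.List.pop?_natCast t i h]
  unfold aTermT
  by_cases h1 : PySem.Chars.isdigit (t.getD i ' ') = true
  · rw [if_pos h1]
    dsimp only
    by_cases h2 : s < t.eraseIdx i
    · rw [if_pos h2, if_pos ⟨h1, h2⟩]
    · rw [if_neg h2, if_neg (by tauto), add_zero]
  · rw [if_neg h1, if_neg (by tauto), add_zero]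

theorem bodyS_eq (s t : List Char) (count : Int) (i : Nat) (h : i < s.length) :
    (if PySem.Chars.isdigit (PySem.List.pyGetD s (↑i) ' ') then
        match PySem.List.pop? s (↑i) with
        | some (_, sl) => if sl < t then count + 1 else count
        | none => count
      else count) = count + aTermS s t i := by
  rw [PySem.List.pyGetD_natCast, PySem.List.pop?_natCast s i h]
  unfold aTermS
  by_cases h1 : PySem.Chars.isdigit (s.getD i ' ') = true
  · rw [if_pos h1]
    dsimp only
    by_cases h2 : s.eraseIdx i < t
    · rw [if_pos h2, if_pos ⟨h1, h2⟩]
    · rw [if_neg h2, if_neg (by tauto), add_zero]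
  · rw [if_neg h1, if_neg (by tauto), add_zero]

theorem removeOneDigit_eq_sums (s t : String) :
    removeOneDigit s t =
      (∑ i ∈ Finset.range t.toList.length, aTermT s.toList t.toList i) +
      (∑ i ∈ Finset.range s.toList.length, aTermS s.toList t.toList i) := by
  unfold removeOneDigit
  simp only [PySem.List.pyRange_zero_nat, List.foldl_map]
  rw [PySem.List.foldl_congr_mem _ _ (fun count (i : Nat) => count + aTermT s.toList t.toList i) _
      (fun acc i hi => bodyT_eq s.toList t.toList acc i (List.mem_range.mp hi))]
  rw [PySem.List.foldl_congr_mem _ _ (fun count (i : Nat) => count + aTermS s.toList t.toList i) _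
      (fun acc i hi => bodyS_eq s.toList t.toList acc i (List.mem_range.mp hi))]
  rw [foldl_range_add, foldl_range_add]
  ring

-- ===== VERDICT (by name: the statement is the Claim_ definition above) =====
theorem removeOneDigit_spec : Claim_equal_removeOneDigit := by
  intro s t _
  show removeOneDigit s t = removeOneDigit_alt s t
  rw [removeOneDigit_eq_sums, sumT_eq_cntT, sumS_eq_cntS, removeOneDigit_alt]
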